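-- pv_equiv track=rewrite | github.com/sid-iitb/Hades-prediction-market | tools/hourly_last_90s_report.py | _build_skips_summary_grouped
-- ===== SOURCE A (Python) =====
-- def _ticker_to_window_id_hourly(ticker: str) -> str:
--     """Derive hourly window/market id from ticker (e.g. KXBTC-26FEB2816-B66625 -> KXBTC-26FEB2816)."""
--     if not ticker or "-" not in ticker:
--         return ticker or ""
--     return ticker.rsplit("-", 1)[0]
--
-- def _build_skips_summary_grouped(skips: list[dict], max_rows: int = 12, max_per_asset: int = 3) -> str:
--     """Summary of skips grouped by asset and skip_reason with window_ids. Same format as last_90s: 'ASSET skipped in W1, W2, ... due to REASON.'"""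
--     if not skips:
--         return "=== SKIPS SUMMARY (by asset and skip reason, max %d rows, max %d per asset) ===\n\nSkips summary: no skips." % (max_rows, max_per_asset)
--     from collections import defaultdict
--     grouped = defaultdict(set)  # (asset, reason) -> set of window_id
--     for s in skips:
--         asset = (s.get("asset") or "").strip().upper() or "?"
--         reason = s.get("skip_reason") or "other"
--         wid = (s.get("window_id") or _ticker_to_window_id_hourly(s.get("ticker") or "") or "").strip()
--         if not wid:
--             wid = "(no window)"
--         grouped[(asset, reason)].add(wid)
--     lines = [
--         "=== SKIPS SUMMARY (by asset and skip reason, max %d rows, max %d per asset) ===" % (max_rows, max_per_asset),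
--         "",
--     ]
--     count = 0
--     seen_asset = defaultdict(int)
--     for (asset, reason), windows in sorted(grouped.items(), key=lambda x: (x[0][0], x[0][1])):
--         if count >= max_rows:
--             break
--         if seen_asset[asset] >= max_per_asset:
--             continue
--         seen_asset[asset] += 1
--         count += 1
--         w_sorted = sorted(w for w in windows if w and w != "(no window)")
--         if not w_sorted and "(no window)" in windows:
--             windows_str = "(no window)"
--         else:
--             windows_str = ", ".join(w_sorted) if w_sorted else "(no window)"
--         lines.append("%s skipped in %s due to %s." % (asset, windows_str, reason))
--     return "\n".join(lines)
-- ===== SOURCE B (Python) =====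
-- def _ticker_to_window_id_hourly(ticker: str) -> str:
--     if not ticker or "-" not in ticker:
--         return ticker or ""
--     return ticker.rsplit("-", 1)[0]
--
-- def _build_skips_summary_grouped(skips: list[dict], max_rows: int = 12, max_per_asset: int = 3) -> str:
--     header = ("=== SKIPS SUMMARY (by asset and skip reason, max %d rows, max %d per asset) ==="
--               % (max_rows, max_per_asset))
--     if not skips:
--         return header + "\n\nSkips summary: no skips."
--     # nested grouping: asset -> reason -> set of window ids, built in one pass
--     tree = {}
--     for s in skips:
--         asset = (s.get("asset") or "").strip().upper() or "?"
--         reason = s.get("skip_reason") or "other"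
--         wid = (s.get("window_id") or _ticker_to_window_id_hourly(s.get("ticker") or "") or "").strip()
--         tree.setdefault(asset, {}).setdefault(reason, set()).add(wid or "(no window)")
--     lines = [header, ""]
--     count = 0
--     for asset in sorted(tree):
--         if count >= max_rows:
--             break
--         per_asset = 0
--         for reason in sorted(tree[asset]):
--             if count >= max_rows or per_asset >= max_per_asset:
--                 break
--             per_asset += 1
--             count += 1
--             windows = tree[asset][reason]
--             named = sorted(w for w in windows if w and w != "(no window)")
--             if named:
--                 windows_str = ", ".join(named)
--             else:
--                 windows_str = "(no window)"
--             lines.append("%s skipped in %s due to %s." % (asset, windows_str, reason))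
--     return "\n".join(lines)
-- ===== Notes on version B (the rewrite author's own statement) =====
-- stated objective: alternative
-- what changed: Replaces A's flat (asset,reason)-keyed defaultdict plus a sort of all pairs and a seen_asset counter dict by a nested dict asset->reason->set built in one pass and two nested sorted loops with a per-asset counter and early breaks.
import Mathlib
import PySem

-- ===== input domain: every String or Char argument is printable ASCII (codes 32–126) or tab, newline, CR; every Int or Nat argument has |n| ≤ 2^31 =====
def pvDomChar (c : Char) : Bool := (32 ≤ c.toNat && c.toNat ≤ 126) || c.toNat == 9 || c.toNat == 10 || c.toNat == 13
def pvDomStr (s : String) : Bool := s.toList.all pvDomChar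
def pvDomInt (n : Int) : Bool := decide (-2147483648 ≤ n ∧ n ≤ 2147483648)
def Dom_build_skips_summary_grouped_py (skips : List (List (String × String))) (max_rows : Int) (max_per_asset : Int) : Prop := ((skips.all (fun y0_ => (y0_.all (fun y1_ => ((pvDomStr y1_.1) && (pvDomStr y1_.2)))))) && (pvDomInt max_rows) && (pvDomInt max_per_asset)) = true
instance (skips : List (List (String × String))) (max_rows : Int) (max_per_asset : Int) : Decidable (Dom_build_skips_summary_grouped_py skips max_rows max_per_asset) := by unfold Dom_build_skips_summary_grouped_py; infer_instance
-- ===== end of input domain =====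

-- B regroups the skips into a nested dict asset → reason → window-set and walks it with two
-- nested loops, instead of A's flat (asset, reason)-keyed dict sorted with a seen_asset counter
-- dict; same output (objective: alternative decomposition, no speed claim).

-- ===== shared normalisation helpers (identical code in both Pythons) =====

-- _ticker_to_window_id_hourly: 'ticker.rsplit("-", 1)[0]' = the prefix before the LAST '-'
def tickerToWindowIdHourly (t : String) : String :=
  if t = "" || !(PySem.Str.isIn "-" t) then t
  else PySem.Str.slice t none (some (PySem.Str.rfind t "-"))

-- s.get(k) or "" on the record dict (first-match association-list lookup; missing key → "")
def pvGetS (s : List (String × String)) (k : String) : String :=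
  ((s.find? (fun p => p.1 == k)).map (·.2)).getD ""

-- (s.get("asset") or "").strip().upper() or "?"
def normAsset (s : List (String × String)) : String :=
  let a := PySem.Str.upper (PySem.Str.strip (pvGetS s "asset"))
  if a = "" then "?" else a

-- s.get("skip_reason") or "other"
def normReason (s : List (String × String)) : String :=
  let r := pvGetS s "skip_reason"
  if r = "" then "other" else r

-- (s.get("window_id") or _ticker_to_window_id_hourly(s.get("ticker") or "") or "").strip(),
-- defaulted to "(no window)" when empty (both Pythons add exactly this value to the set)
def normWid (s : List (String × String)) : String :=
  let w0 := pvGetS s "window_id"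
  let t := if w0 = "" then tickerToWindowIdHourly (pvGetS s "ticker") else w0
  let w := PySem.Str.strip t
  if w = "" then "(no window)" else w

-- the '=== SKIPS SUMMARY … ===' header with both %d fields
def headerLine (max_rows max_per_asset : Int) : String :=
  "=== SKIPS SUMMARY (by asset and skip reason, max " ++ PySem.Int.toStr max_rows ++
    " rows, max " ++ PySem.Int.toStr max_per_asset ++ " per asset) ==="

-- "%s skipped in %s due to %s."
def rowLine (asset wstr reason : String) : String :=
  asset ++ " skipped in " ++ wstr ++ " due to " ++ reason ++ "."

-- ===== PORT A =====

-- A's windows_str: w_sorted = sorted(w for w in windows if w and w != "(no window)"), then the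
-- two-branch formatting exactly as written
def rowWindowsStrA (windows : PySem.Set String) : String :=
  let w_sorted := PySem.List.sorted
    ((windows : List String).filter (fun w => !(w == "") && !(w == "(no window)")))
    (fun x => x) false
  if w_sorted = [] ∧ PySem.Set.contains windows "(no window)" = true then "(no window)"
  else if !(w_sorted = []) then PySem.Str.join ", " w_sorted else "(no window)"

-- A's emission loop over the sorted (asset, reason) rows: global count, seen_asset defaultdict
def loopA (max_rows max_per_asset : Int) :
    List ((String × String) × PySem.Set String) → Int → PySem.Dict String Int → List String
  | [], _, _ => []
  | (ar, windows) :: rest, count, seen =>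
      if max_rows ≤ count then []                      -- break
      else if max_per_asset ≤ seen.getD ar.1 0 then    -- continue
        loopA max_rows max_per_asset rest count seen
      else
        rowLine ar.1 (rowWindowsStrA windows) ar.2 ::
          loopA max_rows max_per_asset rest (count + 1) (seen.modify ar.1 0 (· + 1))

def build_skips_summary_grouped_py (skips : List (List (String × String))) (max_rows : Int) (max_per_asset : Int) : String :=
  if skips = [] then
    headerLine max_rows max_per_asset ++ "\n\nSkips summary: no skips."
  else
    -- grouped = defaultdict(set); grouped[(asset, reason)].add(wid)
    let grouped : PySem.Dict (String × String) (PySem.Set String) :=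
      skips.foldl (fun g s =>
        g.modify (normAsset s, normReason s) PySem.Set.empty
          (fun st => PySem.Set.add st (normWid s))) (PySem.Dict.mk [])
    -- sorted(grouped.items(), key=lambda x: (x[0][0], x[0][1]))
    let rows := PySem.List.sorted2 grouped.items (fun x => x.1.1) (fun x => x.1.2) false
    PySem.Str.join "\n"
      ([headerLine max_rows max_per_asset, ""] ++
        loopA max_rows max_per_asset rows 0 (PySem.Dict.mk []))

-- ===== PORT B =====

-- B's windows_str: named = sorted(...); join if named else "(no window)"
def rowWindowsStrB (windows : PySem.Set String) : String :=
  let named := PySem.List.sorted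
    ((windows : List String).filter (fun w => !(w == "") && !(w == "(no window)")))
    (fun x => x) false
  if !(named = []) then PySem.Str.join ", " named else "(no window)"

-- inner loop over the sorted reasons of one asset; returns (lines, new global count)
def loopBInner (max_rows max_per_asset : Int) (asset : String)
    (inner : PySem.Dict String (PySem.Set String)) :
    List String → Int → Int → List String × Int
  | [], count, _ => ([], count)
  | reason :: rest, count, per =>
      if max_rows ≤ count ∨ max_per_asset ≤ per then ([], count)   -- break
      else
        let line := rowLine asset (rowWindowsStrB (inner.getD reason PySem.Set.empty)) reason
        let p := loopBInner max_rows max_per_asset asset inner rest (count + 1) (per + 1)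
        (line :: p.1, p.2)

-- outer loop over the sorted assets
def loopBOuter (max_rows max_per_asset : Int)
    (tree : PySem.Dict String (PySem.Dict String (PySem.Set String))) :
    List String → Int → List String
  | [], _ => []
  | asset :: rest, count =>
      if max_rows ≤ count then []                      -- break
      else
        let inner := tree.getD asset (PySem.Dict.mk [])
        let p := loopBInner max_rows max_per_asset asset inner
          (PySem.List.sorted inner.keys (fun x => x) false) count 0
        p.1 ++ loopBOuter max_rows max_per_asset tree rest p.2

def build_skips_summary_grouped_py_alt (skips : List (List (String × String))) (max_rows : Int) (max_per_asset : Int) : String :=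
  let header := headerLine max_rows max_per_asset
  if skips = [] then header ++ "\n\nSkips summary: no skips."
  else
    -- tree.setdefault(asset, {}).setdefault(reason, set()).add(wid)  (in-place = Dict.modify)
    let tree : PySem.Dict String (PySem.Dict String (PySem.Set String)) :=
      skips.foldl (fun t s =>
        t.modify (normAsset s) (PySem.Dict.mk [])
          (fun inner => inner.modify (normReason s) PySem.Set.empty
            (fun st => PySem.Set.add st (normWid s)))) (PySem.Dict.mk [])
    PySem.Str.join "\n"
      ([header, ""] ++
        loopBOuter max_rows max_per_asset tree
          (PySem.List.sorted tree.keys (fun x => x) false) 0)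

-- ===== PRECONDITION & SPEC =====
def Spec_build_skips_summary_grouped_py (skips : List (List (String × String))) (max_rows : Int) (max_per_asset : Int) (out : String) : Prop := out = build_skips_summary_grouped_py_alt skips max_rows max_per_asset
instance (skips : List (List (String × String))) (max_rows : Int) (max_per_asset : Int) (out : String) : Decidable (Spec_build_skips_summary_grouped_py skips max_rows max_per_asset out) := by unfold Spec_build_skips_summary_grouped_py; infer_instance

-- ===== CLAIM (what is proved, stated in full; the proofs are below) =====
def Claim_equal_build_skips_summary_grouped_py : Prop := ∀ (skips : List (List (String × String))) (max_rows : Int) (max_per_asset : Int), Dom_build_skips_summary_grouped_py skips max_rows max_per_asset → Spec_build_skips_summary_grouped_py skips max_rows max_per_asset (build_skips_summary_grouped_py skips max_rows max_per_asset)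

-- ===== LEMMAS AND PROOFS =====

-- the two fold step functions (named copies of the lambdas in the ports)
def stepA (g : PySem.Dict (String × String) (PySem.Set String)) (s : List (String × String)) :
    PySem.Dict (String × String) (PySem.Set String) :=
  g.modify (normAsset s, normReason s) PySem.Set.empty
    (fun st => PySem.Set.add st (normWid s))

def stepB (t : PySem.Dict String (PySem.Dict String (PySem.Set String)))
    (s : List (String × String)) : PySem.Dict String (PySem.Dict String (PySem.Set String)) :=
  t.modify (normAsset s) (PySem.Dict.mk [])
    (fun inner => inner.modify (normReason s) PySem.Set.empty
      (fun st => PySem.Set.add st (normWid s)))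

-- flatten a nested dict to a flat (asset, reason)-keyed association list
def flatT (t : PySem.Dict String (PySem.Dict String (PySem.Set String))) :
    List ((String × String) × PySem.Set String) :=
  t.items.flatMap (fun p => p.2.items.map (fun q => ((p.1, q.1), q.2)))

-- the invariant linking A's flat dict with B's nested dict
def InvGT (g : PySem.Dict (String × String) (PySem.Set String))
    (t : PySem.Dict String (PySem.Dict String (PySem.Set String))) : Prop :=
  g.items.Perm (flatT t) ∧ g.keys.Nodup ∧ t.keys.Nodup ∧ ∀ p ∈ t.items, p.2.keys.Nodup

theorem mem_flatT {t : PySem.Dict String (PySem.Dict String (PySem.Set String))}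
    {x : (String × String) × PySem.Set String} :
    x ∈ flatT t ↔ ∃ p ∈ t.items, ∃ q ∈ p.2.items, x = ((p.1, q.1), q.2) := by
  simp [flatT, List.mem_flatMap, eq_comm]

-- A's flat lookup agrees with B's nested lookup
theorem inv_get_corr {g t} (h : InvGT g t) (a r : String) :
    g.get? (a, r) = (t.getD a (PySem.Dict.mk [])).get? r := by
  obtain ⟨hperm, hgnd, htnd, hinn⟩ := h
  apply Option.ext
  intro v
  constructor
  · intro hg
    have hmem := hperm.mem_iff.mp ((PySem.Dict.get?_eq_some_iff_mem_items g (a, r) v hgnd).mp hg)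
    obtain ⟨p, hp, q, hq, hx⟩ := mem_flatT.mp hmem
    obtain ⟨⟨e1, e2⟩, e3⟩ : ((a = p.1 ∧ r = q.1) ∧ v = q.2) := by
      refine ⟨⟨?_, ?_⟩, ?_⟩ <;> [exact congrArg (·.1.1) hx; exact congrArg (·.1.2) hx;
        exact congrArg (·.2) hx]
    have hta : t.get? a = some p.2 := by
      rw [e1]; exact (PySem.Dict.get?_eq_some_iff_mem_items t p.1 p.2 htnd).mpr hp
    rw [PySem.Dict.getD, hta]
    simp only [Option.getD_some]
    refine (PySem.Dict.get?_eq_some_iff_mem_items p.2 r v (hinn p hp)).mpr ?_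
    rw [e2, e3]; exact hq
  · intro hr
    cases hta : t.get? a with
    | none =>
        rw [PySem.Dict.getD, hta] at hr
        simp [PySem.Dict.get?] at hr
    | some inn =>
        rw [PySem.Dict.getD, hta, Option.getD_some] at hr
        have hpmem := (PySem.Dict.get?_eq_some_iff_mem_items t a inn htnd).mp hta
        have hqmem := (PySem.Dict.get?_eq_some_iff_mem_items inn r v
          (hinn (a, inn) hpmem)).mp hr
        refine (PySem.Dict.get?_eq_some_iff_mem_items g (a, r) v hgnd).mpr ?_
        exact hperm.mem_iff.mpr (mem_flatT.mpr ⟨(a, inn), hpmem, (r, v), hqmem, rfl⟩)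


-- the per-asset flattening function
def Fp (p : String × PySem.Dict String (PySem.Set String)) :
    List ((String × String) × PySem.Set String) :=
  p.2.items.map (fun q => ((p.1, q.1), q.2))

theorem flatT_eq (t : PySem.Dict String (PySem.Dict String (PySem.Set String))) :
    flatT t = t.items.flatMap Fp := rfl

theorem perm_append_middle {A : Type} (P L C B : List A) (x : A)
    (h : P.Perm (L ++ C ++ B)) : (P ++ [x]).Perm (L ++ (C ++ [x]) ++ B) := by
  refine (List.perm_append_singleton x P).trans ((h.cons x).trans ?_)
  have e : L ++ (C ++ [x]) ++ B = (L ++ C) ++ x :: B := by simp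
  rw [e]
  have e2 : L ++ C ++ B = (L ++ C) ++ B := by simp
  rw [e2]
  exact List.perm_middle.symm

theorem perm_replace_middle {A : Type} (L B C D : List A) (x y : A)
    (h : (L ++ x :: B).Perm (C ++ x :: D)) : (L ++ y :: B).Perm (C ++ y :: D) := by
  have h1 : (L ++ B).Perm (C ++ D) :=
    ((List.perm_middle.symm.trans h).trans List.perm_middle).cons_inv
  exact List.perm_middle.trans (((h1.cons y)).trans List.perm_middle.symm)

theorem items_decomp {K V : Type} [BEq K] [LawfulBEq K] {d : PySem.Dict K V} {k : K} {v : V}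
    (hnd : d.keys.Nodup) (hmem : (k, v) ∈ d.items) :
    ∃ L1 L2, d.items = L1 ++ (k, v) :: L2 ∧ (∀ p ∈ L1, p.1 ≠ k) ∧ (∀ p ∈ L2, p.1 ≠ k) := by
  obtain ⟨L1, L2, hdec⟩ := List.append_of_mem hmem
  rw [PySem.Dict.keys, hdec, List.map_append, List.map_cons] at hnd
  rcases List.nodup_append.mp hnd with ⟨nd1, nd2, disj⟩
  refine ⟨L1, L2, hdec, ?_, ?_⟩
  · intro p hp he
    have m1 : k ∈ L1.map Prod.fst := List.mem_map.mpr ⟨p, hp, he⟩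
    have m2 : k ∈ k :: L2.map Prod.fst := by simp
    exact disj k m1 k m2 rfl
  · intro p hp he
    exact (List.nodup_cons.mp nd2).1 (he ▸ List.mem_map.mpr ⟨p, hp, rfl⟩)

theorem map_replace {K V : Type} [BEq K] [LawfulBEq K] (L1 L2 : List (K × V)) (k : K) (v v' : V)
    (h1 : ∀ p ∈ L1, p.1 ≠ k) (h2 : ∀ p ∈ L2, p.1 ≠ k) :
    (L1 ++ (k, v) :: L2).map (fun p => if p.1 == k then (k, v') else p)
      = L1 ++ (k, v') :: L2 := by
  simp only [List.map_append, List.map_cons]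
  have e1 : L1.map (fun p => if (p.1 == k) = true then (k, v') else p) = L1.map id :=
    List.map_congr_left (fun p hp => by simp [h1 p hp])
  have e2 : L2.map (fun p => if (p.1 == k) = true then (k, v') else p) = L2.map id :=
    List.map_congr_left (fun p hp => by simp [h2 p hp])
  rw [e1, e2, List.map_id, List.map_id]
  simp

theorem get?_some_of_contains {K V : Type} [BEq K] [LawfulBEq K] (d : PySem.Dict K V) (k : K)
    (h : d.contains k = true) : ∃ v, d.get? k = some v := by
  cases e : d.get? k with
  | none =>
      exact absurd ((PySem.Dict.get?_eq_none_iff_not_mem_keys d k).mp e)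
        (by simpa using (PySem.Dict.contains_iff_mem_keys d k).mp h)
  | some v => exact ⟨v, rfl⟩

theorem contains_of_get?_some {K V : Type} [BEq K] [LawfulBEq K] (d : PySem.Dict K V) (k : K)
    {v : V} (h : d.get? k = some v) : d.contains k = true := by
  by_contra hc
  have : d.get? k = none := (PySem.Dict.get?_eq_none_iff_not_mem_keys d k).mpr
    (fun hm => hc ((PySem.Dict.contains_iff_mem_keys d k).mpr hm))
  simp [this] at h

theorem contains_false_of_get?_none {K V : Type} [BEq K] [LawfulBEq K] (d : PySem.Dict K V)
    (k : K) (h : d.get? k = none) : d.contains k = false := by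
  by_contra hc
  obtain ⟨v, hv⟩ := get?_some_of_contains d k (by revert hc; cases d.contains k <;> simp)
  simp [h] at hv

theorem inv_step {g t} (s : List (String × String)) (h : InvGT g t) :
    InvGT (stepA g s) (stepB t s) := by
  obtain ⟨hperm, hgnd, htnd, hinn⟩ := h
  have hcorr : g.get? (normAsset s, normReason s)
      = (t.getD (normAsset s) (PySem.Dict.mk [])).get? (normReason s) :=
    inv_get_corr ⟨hperm, hgnd, htnd, hinn⟩ _ _
  set a := normAsset s with ha
  set r := normReason s with hr
  set w := normWid s with hw
  set inn := t.getD a (PySem.Dict.mk []) with hinndef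
  set V := PySem.Set.add (inn.getD r PySem.Set.empty) w with hV
  set inn' := inn.insert r V with hinn'def
  have hvals : PySem.Set.add (g.getD (a, r) PySem.Set.empty) w = V := by
    rw [hV, PySem.Dict.getD, PySem.Dict.getD, hcorr]
  have hstepA : stepA g s = g.insert (a, r) V := by
    rw [show stepA g s
      = g.insert (a, r) (PySem.Set.add (g.getD (a, r) PySem.Set.empty) w) from rfl, hvals]
  have hstepB : stepB t s = t.insert a inn' := rfl
  rw [hstepA, hstepB]
  have hinnnd : inn.keys.Nodup := by
    cases e : t.get? a with
    | none => rw [hinndef, PySem.Dict.getD, e]; simp [PySem.Dict.keys]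
    | some i =>
        rw [hinndef, PySem.Dict.getD, e, Option.getD_some]
        exact hinn (a, i) ((PySem.Dict.get?_eq_some_iff_mem_items t a i htnd).mp e)
  have hinn'nd : inn'.keys.Nodup := PySem.Dict.nodup_keys_insert _ _ _ hinnnd
  have hinnall : ∀ p ∈ (t.insert a inn').items, p.2.keys.Nodup := by
    intro p hp
    by_cases hta : t.contains a = true
    · rw [PySem.Dict.items_insert_of_contains t inn' hta] at hp
      obtain ⟨q, hq, hpq⟩ := List.mem_map.mp hp
      by_cases hqa : q.1 = a
      · rw [if_pos (by simp [hqa])] at hpq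
        rw [← hpq]
        exact hinn'nd
      · rw [if_neg (by simp [hqa])] at hpq
        exact hpq ▸ hinn q hq
    · rw [PySem.Dict.items_insert_of_not_contains t inn'
        (by revert hta; cases t.contains a <;> simp)] at hp
      rcases List.mem_append.mp hp with h1 | h1
      · exact hinn p h1
      · rw [List.mem_singleton.mp h1]
        exact hinn'nd
  refine ⟨?_, PySem.Dict.nodup_keys_insert g (a, r) V hgnd,
    PySem.Dict.nodup_keys_insert t a inn' htnd, hinnall⟩
  by_cases hk : g.contains (a, r) = true
  · -- the (asset, reason) pair is already present: replace-in-place on both sides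
    obtain ⟨vold, hv⟩ := get?_some_of_contains g (a, r) hk
    have hinr : inn.get? r = some vold := by rw [← hcorr]; exact hv
    have hta : t.get? a = some inn := by
      cases e : t.get? a with
      | none =>
          rw [hinndef, PySem.Dict.getD, e, Option.getD_none] at hinr
          simp [PySem.Dict.get?] at hinr
      | some i => rw [hinndef, PySem.Dict.getD, e, Option.getD_some]
    have htc : t.contains a = true := contains_of_get?_some t a hta
    have hrc : inn.contains r = true := contains_of_get?_some inn r hinr
    obtain ⟨M1, M2, hgdec, hgo1, hgo2⟩ := items_decomp hgnd
      ((PySem.Dict.get?_eq_some_iff_mem_items g (a, r) vold hgnd).mp hv)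
    obtain ⟨N1, N2, hndec, hno1, hno2⟩ := items_decomp hinnnd
      ((PySem.Dict.get?_eq_some_iff_mem_items inn r vold hinnnd).mp hinr)
    obtain ⟨L1, L2, htdec, hto1, hto2⟩ := items_decomp htnd
      ((PySem.Dict.get?_eq_some_iff_mem_items t a inn htnd).mp hta)
    have hg' : (g.insert (a, r) V).items = M1 ++ ((a, r), V) :: M2 := by
      rw [PySem.Dict.items_insert_of_contains g V hk, hgdec]
      exact map_replace M1 M2 (a, r) vold V hgo1 hgo2
    have hinn'items : inn'.items = N1 ++ (r, V) :: N2 := by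
      rw [hinn'def, PySem.Dict.items_insert_of_contains inn V hrc, hndec]
      exact map_replace N1 N2 r vold V hno1 hno2
    have ht' : (t.insert a inn').items = L1 ++ (a, inn') :: L2 := by
      rw [PySem.Dict.items_insert_of_contains t inn' htc, htdec]
      exact map_replace L1 L2 a inn inn' hto1 hto2
    have hflat' : flatT (t.insert a inn')
        = (L1.flatMap Fp ++ N1.map (fun q => ((a, q.1), q.2)))
          ++ ((a, r), V) :: (N2.map (fun q => ((a, q.1), q.2)) ++ L2.flatMap Fp) := by
      rw [flatT_eq, ht']
      simp [Fp, hinn'items, List.flatMap_append]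
    have hflat : flatT t
        = (L1.flatMap Fp ++ N1.map (fun q => ((a, q.1), q.2)))
          ++ ((a, r), vold) :: (N2.map (fun q => ((a, q.1), q.2)) ++ L2.flatMap Fp) := by
      rw [flatT_eq, htdec]
      simp [Fp, hndec, List.flatMap_append]
    rw [hg', hflat']
    refine perm_replace_middle _ _ _ _ ((a, r), vold) _ ?_
    rw [← hflat, ← hgdec]
    exact hperm
  · -- fresh (asset, reason) pair: appended on both sides
    have hgnone : g.get? (a, r) = none := by
      by_contra hc
      obtain ⟨v, hv⟩ := Option.ne_none_iff_exists'.mp hc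
      exact (by simp [contains_of_get?_some g (a, r) hv] at hk)
    have hrnone : inn.get? r = none := by rw [← hcorr]; exact hgnone
    have hrc : inn.contains r = false := contains_false_of_get?_none inn r hrnone
    have hg' : (g.insert (a, r) V).items = g.items ++ [((a, r), V)] :=
      PySem.Dict.items_insert_of_not_contains g V
        (by by_contra hc; exact hk (by revert hc; cases g.contains (a, r) <;> simp))
    have hinn'items : inn'.items = inn.items ++ [(r, V)] := by
      rw [hinn'def]
      exact PySem.Dict.items_insert_of_not_contains inn V hrc
    rw [hg']
    by_cases hta : t.contains a = true
    · -- the asset exists: its inner dict grows by one reason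
      obtain ⟨inn0, hta'⟩ := get?_some_of_contains t a hta
      have hinn0 : inn = inn0 := by rw [hinndef, PySem.Dict.getD, hta', Option.getD_some]
      obtain ⟨L1, L2, htdec, hto1, hto2⟩ := items_decomp htnd
        ((PySem.Dict.get?_eq_some_iff_mem_items t a inn0 htnd).mp hta')
      have ht' : (t.insert a inn').items = L1 ++ (a, inn') :: L2 := by
        rw [PySem.Dict.items_insert_of_contains t inn' hta, htdec]
        exact map_replace L1 L2 a inn0 inn' hto1 hto2
      have hflat' : flatT (t.insert a inn')
          = L1.flatMap Fp ++ (Fp (a, inn) ++ [((a, r), V)]) ++ L2.flatMap Fp := by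
        rw [flatT_eq, ht']
        simp [List.flatMap_append]
        simp [Fp, hinn'items]
      have hflat : flatT t = L1.flatMap Fp ++ Fp (a, inn) ++ L2.flatMap Fp := by
        rw [flatT_eq, htdec, hinn0]
        simp [List.flatMap_append]
      rw [hflat']
      exact perm_append_middle _ _ _ _ _ (hflat ▸ hperm)
    · -- brand-new asset: appended at the end of the outer dict
      have ht' : (t.insert a inn').items = t.items ++ [(a, inn')] :=
        PySem.Dict.items_insert_of_not_contains t inn'
          (by revert hta; cases t.contains a <;> simp)
      have hinnempty : inn.items = [] := by
        have : t.get? a = none := by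
          by_contra hc
          obtain ⟨i, hi⟩ := Option.ne_none_iff_exists'.mp hc
          simp [contains_of_get?_some t a hi] at hta
        rw [hinndef, PySem.Dict.getD, this, Option.getD_none]
      have hflat' : flatT (t.insert a inn') = flatT t ++ [((a, r), V)] := by
        rw [flatT_eq, ht']
        simp [List.flatMap_append, ← flatT_eq]
        simp [Fp, hinn'items, hinnempty]
      rw [hflat']
      exact hperm.append_right _

theorem inv_fold (skips : List (List (String × String))) :
    ∀ g t, InvGT g t → InvGT (skips.foldl stepA g) (skips.foldl stepB t) := by
  intro g t h
  induction skips generalizing g t with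
  | nil => exact h
  | cons s rest ih => exact ih _ _ (inv_step s h)

theorem inv_init : InvGT (PySem.Dict.mk []) (PySem.Dict.mk []) := by
  refine ⟨by simp [flatT], by simp [PySem.Dict.keys], by simp [PySem.Dict.keys], by simp⟩

-- Python's tuple sort key is the lexicographic order
theorem sorted2_eq_sorted_lex {α : Type} (xs : List α) (k1 k2 : α → String) :
    PySem.List.sorted2 xs k1 k2 false
      = PySem.List.sorted xs (fun x => toLex (k1 x, k2 x)) false := by
  have hb : (fun a b => decide (k1 a < k1 b) || (!decide (k1 b < k1 a) && decide (k2 a < k2 b)))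
      = (fun a b => decide ((toLex (k1 a, k2 a) : Lex (String × String)) < toLex (k1 b, k2 b))) := by
    funext a b
    rcases lt_trichotomy (k1 a) (k1 b) with h|h|h <;>
      simp [Prod.Lex.lt_iff, h, lt_asymm]
  unfold PySem.List.sorted2 PySem.List.sorted
  simp only [Bool.false_eq_true, if_false]
  rw [hb]

-- B's nested sorted traversal, as a flat row list
def zsOf (t : PySem.Dict String (PySem.Dict String (PySem.Set String))) :
    List ((String × String) × PySem.Set String) :=
  (PySem.List.sorted t.keys (fun x => x) false).flatMap (fun a =>
    (PySem.List.sorted (t.getD a (PySem.Dict.mk [])).keys (fun x => x) false).map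
      (fun r => ((a, r), (t.getD a (PySem.Dict.mk [])).getD r PySem.Set.empty)))

theorem pairwise_lt_of_le_nodup {α : Type} [LinearOrder α] {l : List α}
    (h1 : l.Pairwise (· ≤ ·)) (h2 : l.Nodup) : l.Pairwise (· < ·) := by
  exact (h1.and h2).imp (fun {a b} hab => lt_of_le_of_ne hab.1 hab.2)

theorem sorted_keys_lt {l : List String} (h : l.Nodup) :
    (PySem.List.sorted l (fun x => x) false).Pairwise (· < ·) := by
  refine pairwise_lt_of_le_nodup ?_ ((PySem.List.sorted_perm l (fun x => x) false).nodup_iff.mpr h)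
  exact PySem.List.sorted_pairwise l (fun x => x)

theorem inner_keys_nodup {g t} (h : InvGT g t) {a : String} (ha : a ∈ t.keys) :
    (t.getD a (PySem.Dict.mk [])).keys.Nodup := by
  obtain ⟨hperm, hgnd, htnd, hinn⟩ := h
  cases hg : t.get? a with
  | none => exact absurd ha (by simpa using (PySem.Dict.get?_eq_none_iff_not_mem_keys t a).mp hg)
  | some inn =>
      rw [PySem.Dict.getD, hg, Option.getD_some]
      exact hinn (a, inn) ((PySem.Dict.get?_eq_some_iff_mem_items t a inn htnd).mp hg)

theorem zs_perm {g t} (h : InvGT g t) : (zsOf t).Perm g.items := by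
  obtain ⟨hperm, hgnd, htnd, hinn⟩ := h
  refine List.Perm.trans ?_ hperm.symm
  have hflat : flatT t = t.keys.flatMap (fun a =>
      (t.getD a (PySem.Dict.mk [])).items.map (fun q => ((a, q.1), q.2))) := by
    conv_lhs => rw [flatT, PySem.Dict.items_eq_map_keys t htnd (PySem.Dict.mk [])]
    rw [List.flatMap_map]
  rw [hflat]
  unfold zsOf
  refine List.Perm.flatMap (PySem.List.sorted_perm _ _ false) ?_
  intro a ha
  have haK : a ∈ t.keys := (PySem.List.mem_sorted _ _ _ _).mp ha
  have hnd2 := inner_keys_nodup ⟨hperm, hgnd, htnd, hinn⟩ haK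
  have hch : (t.getD a (PySem.Dict.mk [])).items.map (fun q => ((a, q.1), q.2))
      = (t.getD a (PySem.Dict.mk [])).keys.map
          (fun r => ((a, r), (t.getD a (PySem.Dict.mk [])).getD r PySem.Set.empty)) := by
    rw [PySem.Dict.items_eq_map_keys _ hnd2 PySem.Set.empty, List.map_map]
    rfl
  rw [hch]
  exact List.Perm.map _ (PySem.List.sorted_perm _ _ false)

theorem rows_eq {g t} (h : InvGT g t) :
    PySem.List.sorted2 g.items (fun x => x.1.1) (fun x => x.1.2) false = zsOf t := by
  rw [sorted2_eq_sorted_lex]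
  refine PySem.List.sorted_eq_of_perm_of_pairwise_lt _ _ _ (zs_perm h) ?_
  obtain ⟨hperm, hgnd, htnd, hinn⟩ := h
  unfold zsOf
  refine List.pairwise_flatMap.mpr ⟨?_, ?_⟩
  · intro a ha
    refine List.pairwise_map.mpr ?_
    have haK : a ∈ t.keys := (PySem.List.mem_sorted _ _ _ _).mp ha
    refine (sorted_keys_lt (inner_keys_nodup ⟨hperm, hgnd, htnd, hinn⟩ haK)).imp ?_
    intro r1 r2 h12
    exact Prod.Lex.lt_iff.mpr (Or.inr ⟨rfl, h12⟩)
  · refine (sorted_keys_lt htnd).imp ?_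
    intro a1 a2 h12 x hx y hy
    obtain ⟨r1, _, rfl⟩ := List.mem_map.mp hx
    obtain ⟨r2, _, rfl⟩ := List.mem_map.mp hy
    exact Prod.Lex.lt_iff.mpr (Or.inl h12)

-- the two windows_str computations agree
theorem rowWindowsStr_eq (w : PySem.Set String) : rowWindowsStrA w = rowWindowsStrB w := by
  by_cases h : PySem.List.sorted
      ((w : List String).filter (fun x => !(x == "") && !(x == "(no window)")))
      (fun x => x) false = [] <;>
    simp [rowWindowsStrA, rowWindowsStrB, h]

theorem loopA_nil_of_le {mr mpa : Int} {l count seen} (h : mr ≤ count) :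
    loopA mr mpa l count seen = [] := by
  cases l with
  | nil => rfl
  | cons e rest => obtain ⟨ar, w⟩ := e; simp [loopA, h]

theorem loopA_skip {mr mpa : Int} {a : String} {V : String → PySem.Set String}
    (rs : List String) (rest : List ((String × String) × PySem.Set String))
    (count : Int) (seen : PySem.Dict String Int) (h : mpa ≤ seen.getD a 0) :
    loopA mr mpa ((rs.map (fun r => ((a, r), V r))) ++ rest) count seen
      = loopA mr mpa rest count seen := by
  induction rs with
  | nil => rfl
  | cons r rs ih =>
      by_cases hc : mr ≤ count
      · rw [loopA_nil_of_le hc, loopA_nil_of_le hc]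
      · simpa [loopA, hc, h] using ih

theorem inner_decomp {mr mpa : Int} {a : String}
    {inner : PySem.Dict String (PySem.Set String)}
    (rs : List String) (rest : List ((String × String) × PySem.Set String))
    (count per : Int) (seen : PySem.Dict String Int) (hper : seen.getD a 0 = per) :
    ∃ seen', (∀ b, b ≠ a → seen'.getD b 0 = seen.getD b 0) ∧
      loopA mr mpa ((rs.map (fun r => ((a, r), inner.getD r PySem.Set.empty))) ++ rest) count seen
        = (loopBInner mr mpa a inner rs count per).1
          ++ loopA mr mpa rest (loopBInner mr mpa a inner rs count per).2 seen' := by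
  induction rs generalizing count per seen with
  | nil => exact ⟨seen, fun b _ => rfl, rfl⟩
  | cons r rs ih =>
      by_cases hc : mr ≤ count
      · refine ⟨seen, fun b _ => rfl, ?_⟩
        rw [loopA_nil_of_le hc]
        simp [loopBInner, hc, loopA_nil_of_le hc]
      · by_cases hp : mpa ≤ per
        · refine ⟨seen, fun b _ => rfl, ?_⟩
          have hskip := loopA_skip (mr := mr) (mpa := mpa) (a := a)
            (V := fun r => inner.getD r PySem.Set.empty) (r :: rs) rest count seen
            (by rw [hper]; exact hp)
          rw [hskip]
          simp [loopBInner, hc, hp]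
        · obtain ⟨seen', hprop, heq⟩ := ih (count + 1) (per + 1)
            (seen.modify a 0 (· + 1))
            (by simp [PySem.Dict.modify, PySem.Dict.getD_insert_self, hper])
          refine ⟨seen', ?_, ?_⟩
          · intro b hb
            rw [hprop b hb]
            exact PySem.Dict.getD_insert_of_ne seen _ 0 hb
          · simp only [List.map_cons, List.cons_append]
            rw [show loopA mr mpa (((a, r), inner.getD r PySem.Set.empty) ::
                (rs.map (fun r => ((a, r), inner.getD r PySem.Set.empty)) ++ rest)) count seen
              = rowLine a (rowWindowsStrA (inner.getD r PySem.Set.empty)) r ::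
                loopA mr mpa (rs.map (fun r => ((a, r), inner.getD r PySem.Set.empty)) ++ rest)
                  (count + 1) (seen.modify a 0 (· + 1)) from by
                simp [loopA, hc, hper, hp]]
            rw [heq, rowWindowsStr_eq]
            simp [loopBInner, hc, hp]

theorem outer_decomp {mr mpa : Int} (t : PySem.Dict String (PySem.Dict String (PySem.Set String)))
    (as : List String) (count : Int) (seen : PySem.Dict String Int)
    (hnd : as.Nodup) (h0 : ∀ b ∈ as, seen.getD b 0 = 0) :
    loopA mr mpa
      (as.flatMap (fun a =>
        (PySem.List.sorted (t.getD a (PySem.Dict.mk [])).keys (fun x => x) false).map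
          (fun r => ((a, r), (t.getD a (PySem.Dict.mk [])).getD r PySem.Set.empty))))
      count seen
      = loopBOuter mr mpa t as count := by
  induction as generalizing count seen with
  | nil => rfl
  | cons a rest ih =>
      by_cases hc : mr ≤ count
      · rw [loopA_nil_of_le hc]; simp [loopBOuter, hc]
      · simp only [List.flatMap_cons]
        obtain ⟨seen', hprop, heq⟩ := inner_decomp (mr := mr) (mpa := mpa)
          (inner := t.getD a (PySem.Dict.mk []))
          (PySem.List.sorted (t.getD a (PySem.Dict.mk [])).keys (fun x => x) false)
          (rest.flatMap (fun a =>
            (PySem.List.sorted (t.getD a (PySem.Dict.mk [])).keys (fun x => x) false).map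
              (fun r => ((a, r), (t.getD a (PySem.Dict.mk [])).getD r PySem.Set.empty))))
          count 0 seen (h0 a (List.mem_cons_self ..))
        rw [heq]
        rw [ih _ seen' (List.Nodup.of_cons hnd)
          (fun b hb => by
            rw [hprop b (fun e => (List.nodup_cons.mp hnd).1 (e ▸ hb))]
            exact h0 b (List.mem_cons_of_mem _ hb))]
        simp [loopBOuter, hc]

-- ===== VERDICT (by name: the statement is the Claim_ definition above) =====
theorem build_skips_summary_grouped_py_spec : Claim_equal_build_skips_summary_grouped_py := by
  intro skips mr mpa _
  unfold Spec_build_skips_summary_grouped_py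
  unfold build_skips_summary_grouped_py build_skips_summary_grouped_py_alt
  by_cases hnil : skips = []
  · simp [hnil]
  · simp only [hnil, if_false]
    have eA : (fun (g : PySem.Dict (String × String) (PySem.Set String)) s =>
        g.modify (normAsset s, normReason s) PySem.Set.empty
          (fun st => PySem.Set.add st (normWid s))) = stepA := rfl
    have eB : (fun (t : PySem.Dict String (PySem.Dict String (PySem.Set String))) s =>
        t.modify (normAsset s) (PySem.Dict.mk [])
          (fun inner => inner.modify (normReason s) PySem.Set.empty
            (fun st => PySem.Set.add st (normWid s)))) = stepB := rfl
    rw [eA, eB]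
    have hInv := inv_fold skips _ _ inv_init
    rw [rows_eq hInv]
    congr 2
    have hkeys : (skips.foldl stepB (PySem.Dict.mk [])).keys.Nodup := hInv.2.2.1
    exact outer_decomp _ _ 0 (PySem.Dict.mk [])
      ((PySem.List.sorted_perm _ _ false).nodup_iff.mpr hkeys)
      (fun b _ => rfl)
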